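-- pv_equiv track=rewrite | github.com/kaarneshvs/210701100-CS19643-FOML-LAB | FOML/PROJECT/extract_stud_images.py | removeUnwantedChars
-- ===== SOURCE A (Python) =====
-- def removeUnwantedChars(inputString):
-- 	for i in range(len(inputString)):
-- 		cur_info = inputString[i]
-- 		cur_info = cur_info.replace("[","")
-- 		cur_info = cur_info.replace("{","")
-- 		cur_info = cur_info.replace("]","")
-- 		cur_info = cur_info.replace("}","")
-- 		cur_info = cur_info.replace("\"","")
-- 		cur_info = cur_info.replace("\"","")
-- 		cur_info = cur_info.replace("?","")
-- 		inputString[i] = cur_info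
-- 	return inputString
-- ===== SOURCE B (Python) =====
-- def removeUnwantedChars(inputString):
--     bad = {'[', '{', ']', '}', '"', '?'}
--     for i in range(len(inputString)):
--         inputString[i] = ''.join(c for c in inputString[i] if c not in bad)
--     return inputString
-- ===== Notes on version B (the rewrite author's own statement) =====
-- stated objective: simpler
-- what changed: Replaces the six sequential str.replace passes per element with one membership-filtered character pass against a set of unwanted characters; in-place mutation and returning the same list are preserved.
import Mathlib
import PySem

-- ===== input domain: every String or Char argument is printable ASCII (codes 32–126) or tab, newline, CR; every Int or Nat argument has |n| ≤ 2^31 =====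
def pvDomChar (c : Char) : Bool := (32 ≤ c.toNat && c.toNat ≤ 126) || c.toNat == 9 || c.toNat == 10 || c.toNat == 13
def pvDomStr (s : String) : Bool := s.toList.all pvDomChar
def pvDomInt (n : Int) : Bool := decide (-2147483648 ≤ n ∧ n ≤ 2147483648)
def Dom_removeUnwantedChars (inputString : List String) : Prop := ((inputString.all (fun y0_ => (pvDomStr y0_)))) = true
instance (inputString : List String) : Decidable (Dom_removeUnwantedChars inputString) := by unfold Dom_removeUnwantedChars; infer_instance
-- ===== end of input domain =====

-- B rebuilds each string in one membership-filtered character pass instead of A's six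
-- sequential replace passes. A mutates the Python list in place; the equivalence proved
-- here is about the returned value (B performs the same in-place mutation in Python).

-- ===== PORT A =====
def removeUnwantedChars (inputString : List String) : List String :=
  inputString.map (fun cur_info =>
    let cur_info := PySem.Str.replace cur_info "[" ""
    let cur_info := PySem.Str.replace cur_info "{" ""
    let cur_info := PySem.Str.replace cur_info "]" ""
    let cur_info := PySem.Str.replace cur_info "}" ""
    let cur_info := PySem.Str.replace cur_info "\"" ""
    let cur_info := PySem.Str.replace cur_info "\"" ""
    let cur_info := PySem.Str.replace cur_info "?" ""
    cur_info)

-- ===== PORT B =====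
def badChars : List Char := ['[', '{', ']', '}', '"', '?']

def removeUnwantedChars_alt (inputString : List String) : List String :=
  inputString.map (fun s => String.ofList (s.toList.filter (fun c => !(badChars.contains c))))

-- ===== PRECONDITION & SPEC =====
def Spec_removeUnwantedChars (inputString : List String) (out : List String) : Prop := out = removeUnwantedChars_alt inputString
instance (inputString : List String) (out : List String) : Decidable (Spec_removeUnwantedChars inputString out) := by unfold Spec_removeUnwantedChars; infer_instance

-- ===== CLAIM (what is proved, stated in full; the proofs are below) =====
def Claim_equal_removeUnwantedChars : Prop := ∀ (inputString : List String), Dom_removeUnwantedChars inputString → Spec_removeUnwantedChars inputString (removeUnwantedChars inputString)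

-- ===== LEMMAS AND PROOFS =====

-- replace.go with a single-char pattern and empty replacement, run with exactly enough fuel,
-- is a filter dropping that character.
theorem go_single (b : Char) : ∀ (l acc : List Char),
    PySem.Chars.replace.go [b] [] l.length l acc
      = acc.reverse ++ l.filter (fun c => !(c == b)) := by
  intro l
  induction l with
  | nil => intro acc; simp [PySem.Chars.replace.go]
  | cons c t ih =>
    intro acc
    rw [PySem.Chars.replace.go.eq_def]
    by_cases h : c = b
    · subst h
      simp [List.isPrefixOf, ih]
    · have hp : [b].isPrefixOf (c :: t) = false := by
        simp [List.isPrefixOf]; exact fun hbc => (h hbc.symm).elim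
      simp only [List.length_cons, hp, Bool.false_eq_true, if_false, ih]
      simp [h]

theorem replace_single (b : Char) (l : List Char) :
    PySem.Chars.replace l [b] [] = l.filter (fun c => !(c == b)) := by
  simp [PySem.Chars.replace, List.isEmpty, go_single]

theorem removeUnwantedChars_spec : Claim_equal_removeUnwantedChars := by
  intro inputString _
  unfold Spec_removeUnwantedChars removeUnwantedChars removeUnwantedChars_alt
  refine List.map_congr_left (fun s _ => ?_) 
  apply String.ext
  simp only [PySem.Str.toList_replace, String.toList_ofList]
  rw [show ("[" : String).toList = ['['] from rfl, show ("{" : String).toList = ['{'] from rfl,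
      show ("]" : String).toList = [']'] from rfl, show ("}" : String).toList = ['}'] from rfl,
      show ("\"" : String).toList = ['"'] from rfl, show ("?" : String).toList = ['?'] from rfl,
      show ("" : String).toList = [] from rfl]
  simp only [replace_single]
  rw [List.filter_filter, List.filter_filter, List.filter_filter, List.filter_filter,
      List.filter_filter, List.filter_filter]
  refine List.filter_congr (fun c _ => ?_)
  simp only [badChars, List.contains_cons, List.contains_nil, Bool.or_false, Bool.not_or]
  cases c == '[' <;> cases c == '{' <;> cases c == ']' <;> cases c == '}' <;>
    cases c == '"' <;> cases c == '?' <;> rfl
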